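-- pv_equiv track=rewrite | github.com/Yknld/smrtr | scripts/smartr_video_planner.py | determine_visual_type
-- ===== SOURCE A (Python) =====
-- from typing import Dict, List, Optional, Tuple
--
-- def determine_visual_type(content: str, scene_num: int, total_scenes: int) -> Tuple[str, Optional[str], Optional[str]]:
--     """Determine best visual type for scene content."""
--     content_lower = content.lower()
--
--     # Keywords that suggest diagrams/charts
--     diagram_keywords = ['process', 'flow', 'steps', 'sequence', 'timeline', 'cycle', 'algorithm', 'workflow', 'stages', 'phases']
--     chart_keywords = ['compare', 'difference', 'versus', 'statistics', 'data', 'percentage', 'increase', 'decrease', 'trend']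
--
--     # Check for diagram/chart indicators
--     if any(kw in content_lower for kw in diagram_keywords):
--         # Try to determine diagram type
--         if 'flow' in content_lower or 'process' in content_lower or 'steps' in content_lower:
--             return ("diagram", "flowchart", None)
--         elif 'timeline' in content_lower or 'sequence' in content_lower:
--             return ("diagram", "timeline", None)
--         elif 'cycle' in content_lower:
--             return ("diagram", "flowchart", None)  # Cycle as flowchart
--         else:
--             return ("diagram", "concept_map", None)
--     elif any(kw in content_lower for kw in chart_keywords):
--         return ("chart", None, None)
--     elif scene_num <= 2 or scene_num >= total_scenes - 1:
--         # Intro/outro scenes use illustrations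
--         return ("illustration", None, None)
--     else:
--         # Default to illustration for middle scenes
--         return ("illustration", None, None)
-- ===== SOURCE B (Python) =====
-- # First-match scan over one ordered (keyword -> result) rule table; same result as A.
-- _RULES = [
--     ("flow", ("diagram", "flowchart", None)),
--     ("process", ("diagram", "flowchart", None)),
--     ("steps", ("diagram", "flowchart", None)),
--     ("timeline", ("diagram", "timeline", None)),
--     ("sequence", ("diagram", "timeline", None)),
--     ("cycle", ("diagram", "flowchart", None)),
--     ("algorithm", ("diagram", "concept_map", None)),
--     ("workflow", ("diagram", "concept_map", None)),
--     ("stages", ("diagram", "concept_map", None)),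
--     ("phases", ("diagram", "concept_map", None)),
--     ("compare", ("chart", None, None)),
--     ("difference", ("chart", None, None)),
--     ("versus", ("chart", None, None)),
--     ("statistics", ("chart", None, None)),
--     ("data", ("chart", None, None)),
--     ("percentage", ("chart", None, None)),
--     ("increase", ("chart", None, None)),
--     ("decrease", ("chart", None, None)),
--     ("trend", ("chart", None, None)),
-- ]
--
-- def determine_visual_type(content, scene_num, total_scenes):
--     content_lower = content.lower()
--     for kw, result in _RULES:
--         if kw in content_lower:
--             return result
--     return ("illustration", None, None)
-- ===== Notes on version B (the rewrite author's own statement) =====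
-- stated objective: simpler
-- what changed: Replaced the any-over-keyword-list gate plus nested if/elif type dispatch (and the dead intro/outro branch, whose both arms return illustration) by a single first-match scan over one ordered (keyword, result) rule table with an illustration default.
import Mathlib
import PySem

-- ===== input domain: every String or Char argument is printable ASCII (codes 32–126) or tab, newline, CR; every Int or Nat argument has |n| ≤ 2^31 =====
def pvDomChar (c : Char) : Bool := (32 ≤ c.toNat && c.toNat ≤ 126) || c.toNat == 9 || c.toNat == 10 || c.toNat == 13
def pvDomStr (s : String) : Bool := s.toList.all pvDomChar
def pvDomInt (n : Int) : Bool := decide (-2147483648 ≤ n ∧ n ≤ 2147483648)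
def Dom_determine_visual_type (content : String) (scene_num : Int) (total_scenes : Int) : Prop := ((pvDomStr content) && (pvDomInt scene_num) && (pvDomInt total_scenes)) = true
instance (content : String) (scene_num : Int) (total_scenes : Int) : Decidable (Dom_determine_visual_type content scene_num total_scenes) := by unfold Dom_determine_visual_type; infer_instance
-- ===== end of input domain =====

-- B replaces the any-gate + nested if/elif by one first-match scan over an ordered rule table (objective: simpler).


-- ===== PORT A =====
def determine_visual_type (content : String) (scene_num : Int) (total_scenes : Int) : String × Option String × Option String :=
  let content_lower := PySem.Str.lower content
  let diagram_keywords : List String := ["process", "flow", "steps", "sequence", "timeline", "cycle", "algorithm", "workflow", "stages", "phases"]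
  let chart_keywords : List String := ["compare", "difference", "versus", "statistics", "data", "percentage", "increase", "decrease", "trend"]
  if diagram_keywords.any (fun kw => PySem.Str.isIn kw content_lower) then
    if PySem.Str.isIn "flow" content_lower || PySem.Str.isIn "process" content_lower || PySem.Str.isIn "steps" content_lower then
      ("diagram", some "flowchart", none)
    else if PySem.Str.isIn "timeline" content_lower || PySem.Str.isIn "sequence" content_lower then
      ("diagram", some "timeline", none)
    else if PySem.Str.isIn "cycle" content_lower then
      ("diagram", some "flowchart", none)
    else
      ("diagram", some "concept_map", none)
  else if chart_keywords.any (fun kw => PySem.Str.isIn kw content_lower) then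
    ("chart", none, none)
  else if scene_num ≤ 2 ∨ scene_num ≥ total_scenes - 1 then
    ("illustration", none, none)
  else
    ("illustration", none, none)

-- ===== PORT B =====
-- B: ordered (keyword, result) rule table, first-match scan, illustration default.
def dvtRules : List (String × (String × Option String × Option String)) :=
  [("flow", ("diagram", some "flowchart", none)),
   ("process", ("diagram", some "flowchart", none)),
   ("steps", ("diagram", some "flowchart", none)),
   ("timeline", ("diagram", some "timeline", none)),
   ("sequence", ("diagram", some "timeline", none)),
   ("cycle", ("diagram", some "flowchart", none)),
   ("algorithm", ("diagram", some "concept_map", none)),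
   ("workflow", ("diagram", some "concept_map", none)),
   ("stages", ("diagram", some "concept_map", none)),
   ("phases", ("diagram", some "concept_map", none)),
   ("compare", ("chart", none, none)),
   ("difference", ("chart", none, none)),
   ("versus", ("chart", none, none)),
   ("statistics", ("chart", none, none)),
   ("data", ("chart", none, none)),
   ("percentage", ("chart", none, none)),
   ("increase", ("chart", none, none)),
   ("decrease", ("chart", none, none)),
   ("trend", ("chart", none, none))]

def dvtScan (content_lower : String) : List (String × (String × Option String × Option String)) → String × Option String × Option String
  | [] => ("illustration", none, none)
  | (kw, r) :: rest => if PySem.Str.isIn kw content_lower then r else dvtScan content_lower rest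

def determine_visual_type_alt (content : String) (scene_num : Int) (total_scenes : Int) : String × Option String × Option String :=
  dvtScan (PySem.Str.lower content) dvtRules

-- ===== PRECONDITION & SPEC =====
def Spec_determine_visual_type (content : String) (scene_num : Int) (total_scenes : Int) (out : String × Option String × Option String) : Prop := out = determine_visual_type_alt content scene_num total_scenes
instance (content : String) (scene_num : Int) (total_scenes : Int) (out : String × Option String × Option String) : Decidable (Spec_determine_visual_type content scene_num total_scenes out) := by unfold Spec_determine_visual_type; infer_instance

-- ===== CLAIM (what is proved, stated in full; the proofs are below) =====
def Claim_equal_determine_visual_type : Prop := ∀ (content : String) (scene_num : Int) (total_scenes : Int), Dom_determine_visual_type content scene_num total_scenes → Spec_determine_visual_type content scene_num total_scenes (determine_visual_type content scene_num total_scenes)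

-- ===== LEMMAS AND PROOFS =====

-- ===== VERDICT (by name: the statement is the Claim_ definition above) =====
theorem determine_visual_type_spec : Claim_equal_determine_visual_type := by
  intro content scene_num total_scenes _
  unfold Spec_determine_visual_type
  simp only [determine_visual_type, determine_visual_type_alt, dvtScan, dvtRules,
    List.any_cons, List.any_nil, Bool.or_false, Bool.or_eq_true,
    PySem.Str.isIn_eq, PySem.Str.toList_lower]
  by_cases h0 : PySem.Chars.isIn ['f', 'l', 'o', 'w'] (PySem.Chars.lower content.toList) = true <;> simp [*]
  by_cases h1 : PySem.Chars.isIn ['p', 'r', 'o', 'c', 'e', 's', 's'] (PySem.Chars.lower content.toList) = true <;> simp [*]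
  by_cases h2 : PySem.Chars.isIn ['s', 't', 'e', 'p', 's'] (PySem.Chars.lower content.toList) = true <;> simp [*]
  by_cases h3 : PySem.Chars.isIn ['t', 'i', 'm', 'e', 'l', 'i', 'n', 'e'] (PySem.Chars.lower content.toList) = true <;> simp [*]
  by_cases h4 : PySem.Chars.isIn ['s', 'e', 'q', 'u', 'e', 'n', 'c', 'e'] (PySem.Chars.lower content.toList) = true <;> simp [*]
  by_cases h5 : PySem.Chars.isIn ['c', 'y', 'c', 'l', 'e'] (PySem.Chars.lower content.toList) = true <;> simp [*]
  by_cases h6 : PySem.Chars.isIn ['a', 'l', 'g', 'o', 'r', 'i', 't', 'h', 'm'] (PySem.Chars.lower content.toList) = true <;> simp [*]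
  by_cases h7 : PySem.Chars.isIn ['w', 'o', 'r', 'k', 'f', 'l', 'o', 'w'] (PySem.Chars.lower content.toList) = true <;> simp [*]
  by_cases h8 : PySem.Chars.isIn ['s', 't', 'a', 'g', 'e', 's'] (PySem.Chars.lower content.toList) = true <;> simp [*]
  by_cases h9 : PySem.Chars.isIn ['p', 'h', 'a', 's', 'e', 's'] (PySem.Chars.lower content.toList) = true <;> simp [*]
  by_cases h10 : PySem.Chars.isIn ['c', 'o', 'm', 'p', 'a', 'r', 'e'] (PySem.Chars.lower content.toList) = true <;> simp [*]
  by_cases h11 : PySem.Chars.isIn ['d', 'i', 'f', 'f', 'e', 'r', 'e', 'n', 'c', 'e'] (PySem.Chars.lower content.toList) = true <;> simp [*]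
  by_cases h12 : PySem.Chars.isIn ['v', 'e', 'r', 's', 'u', 's'] (PySem.Chars.lower content.toList) = true <;> simp [*]
  by_cases h13 : PySem.Chars.isIn ['s', 't', 'a', 't', 'i', 's', 't', 'i', 'c', 's'] (PySem.Chars.lower content.toList) = true <;> simp [*]
  by_cases h14 : PySem.Chars.isIn ['d', 'a', 't', 'a'] (PySem.Chars.lower content.toList) = true <;> simp [*]
  by_cases h15 : PySem.Chars.isIn ['p', 'e', 'r', 'c', 'e', 'n', 't', 'a', 'g', 'e'] (PySem.Chars.lower content.toList) = true <;> simp [*]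
  by_cases h16 : PySem.Chars.isIn ['i', 'n', 'c', 'r', 'e', 'a', 's', 'e'] (PySem.Chars.lower content.toList) = true <;> simp [*]
  by_cases h17 : PySem.Chars.isIn ['d', 'e', 'c', 'r', 'e', 'a', 's', 'e'] (PySem.Chars.lower content.toList) = true <;> simp [*]
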